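-- pv_equiv track=rewrite | github.com/Ampreee/codeforces_python | A_Lucky_Division.py | alm
-- ===== SOURCE A (Python) =====
-- def alm(n):
--     l=[]
--     def gen(c):
--         if(c>1000):
--             return
--         if(c>0):
--             l.append(c)
--         gen(c*10+4)
--         gen(c*10+7)
--     gen(0)
--     for i in l:
--         if(n%i==0):
--             return "YES"
--     return "NO"
-- ===== SOURCE B (Python) =====
-- def alm(n):
--     lucky = []
--     level = [0]
--     for _ in range(3):
--         level = [c * 10 + d for c in level for d in (4, 7)]
--         lucky.extend(level)
--     return "YES" if any(n % x == 0 for x in lucky) else "NO"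
-- ===== Notes on version B (the rewrite author's own statement) =====
-- stated objective: simpler
-- what changed: Replaces the recursive DFS closure that mutates an outer list with a breadth-first, level-by-level list-comprehension enumeration of every lucky number in range, and replaces the early-return loop with any().
import Mathlib
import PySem

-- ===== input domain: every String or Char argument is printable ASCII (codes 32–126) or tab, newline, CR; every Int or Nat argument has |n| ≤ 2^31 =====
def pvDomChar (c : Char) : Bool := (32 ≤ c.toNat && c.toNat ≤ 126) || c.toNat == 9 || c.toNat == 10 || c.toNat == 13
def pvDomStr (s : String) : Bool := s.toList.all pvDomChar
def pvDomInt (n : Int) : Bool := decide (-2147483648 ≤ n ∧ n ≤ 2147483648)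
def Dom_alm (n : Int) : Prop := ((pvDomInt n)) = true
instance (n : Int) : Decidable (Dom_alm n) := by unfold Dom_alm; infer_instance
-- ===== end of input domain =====

-- B replaces A's recursive DFS closure by an iterative level-by-level enumeration of the lucky numbers and an any() divisibility test (objective: simpler); same return value.
-- ===== PORT A =====
-- gen(c): fuel makes the recursion total; A always calls gen 0, where fuel 5 exceeds
-- the recursion depth (c>1000 cuts off after at most 4 levels).
def almGen (fuel : Nat) (c : Int) : List Int :=
  match fuel with
  | 0 => []
  | f + 1 =>
    if c > 1000 then []
    else (if c > 0 then [c] else []) ++ almGen f (c * 10 + 4) ++ almGen f (c * 10 + 7)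

-- the 'for i in l: if n % i == 0: return "YES"' loop
def almLoop (n : Int) : List Int → String
  | [] => "NO"
  | i :: rest => if PySem.Int.mod n i == 0 then "YES" else almLoop n rest

def alm (n : Int) : String :=
  almLoop n (almGen 5 0)

-- ===== PORT B =====
-- one level of the breadth-first comprehension [c*10+d for c in level for d in (4,7)]
def almLevelStep (level : List Int) : List Int :=
  level.flatMap (fun c => [c * 10 + 4, c * 10 + 7])

def alm_alt (n : Int) : String :=
  let l1 := almLevelStep [0]
  let l2 := almLevelStep l1
  let l3 := almLevelStep l2
  let lucky := l1 ++ l2 ++ l3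
  if lucky.any (fun x => PySem.Int.mod n x == 0) then "YES" else "NO"

-- ===== PRECONDITION & SPEC =====
def Spec_alm (n : Int) (out : String) : Prop := out = alm_alt n
instance (n : Int) (out : String) : Decidable (Spec_alm n out) := by unfold Spec_alm; infer_instance

-- ===== CLAIM (what is proved, stated in full; the proofs are below) =====
def Claim_equal_alm : Prop := ∀ (n : Int), Dom_alm n → Spec_alm n (alm n)

-- ===== LEMMAS AND PROOFS =====

-- ===== VERDICT (by name: the statement is the Claim_ definition above) =====
-- A's early-return loop equals an 'any' test over the same list
theorem almLoop_eq_any (n : Int) (l : List Int) :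
    almLoop n l = if l.any (fun i => PySem.Int.mod n i == 0) then "YES" else "NO" := by
  induction l with
  | nil => rfl
  | cons i rest ih =>
    simp only [almLoop, List.any_cons, Bool.or_eq_true]
    by_cases h : PySem.Int.mod n i == 0 <;> simp [h, ih]

-- A's DFS list and B's BFS list contain the same lucky numbers (in different orders)
theorem alm_lists_perm :
    (almGen 5 0).Perm
      (almLevelStep [0] ++ almLevelStep (almLevelStep [0]) ++
        almLevelStep (almLevelStep (almLevelStep [0]))) := by
  decide

theorem alm_spec : Claim_equal_alm := by
  intro n _
  unfold Spec_alm alm alm_alt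
  rw [almLoop_eq_any, List.Perm.any_eq alm_lists_perm]
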